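-- pv_equiv track=rewrite | github.com/estomagordo/advent_of_code_2015 | 21a.py | solve
-- ===== SOURCE A (Python) =====
-- from itertools import combinations
-- from copy import copy
--
-- def fight(player, boss):
--     moves = 0
--
--     while player[0] > 0 and boss[0] > 0:
--         damage = [player, boss][moves % 2][1]
--         armour = [boss, player][moves % 2][2]
--         deals = max(1, damage - armour)
--         [boss, player][moves % 2][0] -= deals
--         moves += 1
--
--     return moves % 2
--
-- def solve(boss):
--     swords = ((8, 4, 0), (10, 5, 0), (25, 6, 0), (40, 7, 0), (74, 8, 0))
--     armours = ((0, 0, 0), (13, 0, 1), (31, 0, 2), (53, 0, 3), (75, 0, 4), (102, 0, 5))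
--     rings = ((25, 1, 0), (50, 2, 0), (100, 3, 0), (20, 0, 1), (40, 0, 2), (80, 0, 3))
--
--     gold = 8
--
--     while True:
--         for sword in swords:
--             if sword[0] > gold:
--                 break
--             for armour in armours:
--                 if sword[0] + armour[0] > gold:
--                     break
--                 if fight([100, sword[1], armour[2]], copy(boss)):
--                     return gold
--                 for ring in rings:
--                     if sword[0] + armour[0] + ring[0] > gold:
--                         continue
--                     if fight([100, sword[1] + ring[1], armour[2] + ring[2]], copy(boss)):
--                         return gold
--                 for ringpair in combinations(rings, 2):
--                     if sword[0] + armour[0] + ringpair[0][0] + ringpair[1][0] > gold: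
--                         continue
--                     if fight([100, sword[1] + ringpair[0][1] + ringpair[1][1], armour[2] + ringpair[0][2] + ringpair[1][2]], copy(boss)):
--                         return gold
--
--         gold += 1
-- ===== SOURCE B (Python) =====
-- def solve(boss):
--     hp, bdmg, barm = boss[0], boss[1], boss[2]
--     swords = [(8, 4), (10, 5), (25, 6), (40, 7), (74, 8)]
--     armours = [(0, 0), (13, 1), (31, 2), (53, 3), (75, 4), (102, 5)]
--     rings = [(25, 1, 0), (50, 2, 0), (100, 3, 0), (20, 0, 1), (40, 0, 2), (80, 0, 3)]
--     ring_opts = [(0, 0, 0)] + rings + [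
--         (r1[0] + r2[0], r1[1] + r2[1], r1[2] + r2[2])
--         for i, r1 in enumerate(rings) for r2 in rings[i + 1:]]
--
--     def wins(dmg, arm):
--         dp = max(1, dmg - barm)
--         db = max(1, bdmg - arm)
--         return (hp + dp - 1) // dp <= (100 + db - 1) // db
--
--     cands = [sc + ac + rc
--              for sc, sd in swords
--              for ac, aa in armours
--              for rc, rd, ra in ring_opts
--              if wins(sd + rd, aa + ra)]
--     return min(cands) if cands else 0
-- ===== Notes on version B (the rewrite author's own statement) =====
-- stated objective: faster
-- what changed: A searches gold = 8,9,10,... and for each gold re-scans every affordable equipment combo, simulating each fight turn by turn until someone's hp drops to 0; B enumerates the 660 fixed loadouts once, decides each fight in O(1) with the closed-form ceiling-division turn-count comparison ceil(bossHp/playerDeal) <= ceil(100/bossDeal), and returns the minimum winning cost; Pre_ excludes boss lists shorter than 3 (A raises IndexError) and bosses with non-positive hp or no winning loadout (A's while-True loop never returns).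
import Mathlib
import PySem

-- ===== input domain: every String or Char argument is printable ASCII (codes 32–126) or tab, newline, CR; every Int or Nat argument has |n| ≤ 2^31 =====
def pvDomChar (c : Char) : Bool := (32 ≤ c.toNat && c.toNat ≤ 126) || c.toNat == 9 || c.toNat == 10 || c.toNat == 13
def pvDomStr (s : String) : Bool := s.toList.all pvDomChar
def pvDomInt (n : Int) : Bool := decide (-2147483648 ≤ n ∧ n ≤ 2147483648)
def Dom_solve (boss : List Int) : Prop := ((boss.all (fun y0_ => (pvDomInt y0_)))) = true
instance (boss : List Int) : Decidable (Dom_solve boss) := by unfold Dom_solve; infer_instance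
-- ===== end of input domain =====

-- B replaces A's gold-by-gold re-simulation (increment gold, re-fight every affordable combo
-- turn by turn) with one pass over all 660 fixed loadouts, deciding each fight by a closed-form
-- ceiling-division turn count and returning the minimum winning cost; objective: faster.

-- ===== PORT A =====
-- the while-loop of fight: moves%2 picks attacker (0 = player); [boss,player][moves%2][0] -= deals
def fightAux : Nat → Int → Int → Int → Int → Int → Int → Int → Int
  | 0, _, _, _, _, _, _, moves => moves % 2      -- fuel guard only; never reached when called from solve
  | f + 1, php, pd, pa, bhp, bd, ba, moves =>
    if php > 0 ∧ bhp > 0 then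
      if moves % 2 = 0 then
        fightAux f php pd pa (bhp - max 1 (pd - ba)) bd ba (moves + 1)
      else
        fightAux f (php - max 1 (bd - pa)) pd pa bhp bd ba (moves + 1)
    else moves % 2

-- fight(player, boss): each loop step strictly decreases php+bhp, so this fuel is enough
def fightA (php pd pa bhp bd ba : Int) : Int :=
  fightAux ((php + bhp).toNat + 1) php pd pa bhp bd ba 0

def swordsA : List (Int × Int × Int) := [(8,4,0),(10,5,0),(25,6,0),(40,7,0),(74,8,0)]
def armoursA : List (Int × Int × Int) := [(0,0,0),(13,0,1),(31,0,2),(53,0,3),(75,0,4),(102,0,5)]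
def ringsA : List (Int × Int × Int) := [(25,1,0),(50,2,0),(100,3,0),(20,0,1),(40,0,2),(80,0,3)]

-- itertools.combinations(xs, 2), in itertools order
def comb2 {α : Type} : List α → List (α × α)
  | [] => []
  | x :: xs => xs.map (fun y => (x, y)) ++ comb2 xs

-- a for-loop that breaks as soon as c holds, else tests p
def breakAny {α : Type} (c p : α → Bool) : List α → Bool
  | [] => false
  | x :: xs => if c x then false else (p x || breakAny c p xs)

-- body of the armour loop: bare fight, then the single-ring loop, then the ring-pair loop
def tryArmour (b0 b1 b2 g sc sd : Int) (a : Int × Int × Int) : Bool :=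
  (fightA 100 sd a.2.2 b0 b1 b2 != 0)
  || ringsA.any (fun r =>
       !(decide (sc + a.1 + r.1 > g)) && (fightA 100 (sd + r.2.1) (a.2.2 + r.2.2) b0 b1 b2 != 0))
  || (comb2 ringsA).any (fun rp =>
       !(decide (sc + a.1 + rp.1.1 + rp.2.1 > g))
         && (fightA 100 (sd + rp.1.2.1 + rp.2.2.1) (a.2.2 + rp.1.2.2 + rp.2.2.2) b0 b1 b2 != 0))

-- one pass of the 'while True' body at a given gold (a win makes solve return that gold)
def tryGold (b0 b1 b2 g : Int) : Bool :=
  breakAny (fun s => decide (s.1 > g))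
    (fun s => breakAny (fun a => decide (s.1 + a.1 > g)) (tryArmour b0 b1 b2 g s.1 s.2.1) armoursA)
    swordsA

-- the 'while True: ... gold += 1' loop; 400 fuel suffices: a win costs at most 356 gold (proved below)
def solveAux (b0 b1 b2 : Int) : Nat → Int → Int
  | 0, g => g      -- fuel guard only; never reached inside Pre_solve
  | f + 1, g => if tryGold b0 b1 b2 g then g else solveAux b0 b1 b2 f (g + 1)

def solve (boss : List Int) : Int :=
  match boss with
  | b0 :: b1 :: b2 :: _ => solveAux b0 b1 b2 400 8
  | _ => 0      -- Python raises IndexError here; outside Pre_solve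

-- ===== PORT B =====
def swordsB : List (Int × Int) := [(8,4),(10,5),(25,6),(40,7),(74,8)]
def armoursB : List (Int × Int) := [(0,0),(13,1),(31,2),(53,3),(75,4),(102,5)]
def ringsB : List (Int × Int × Int) := [(25,1,0),(50,2,0),(100,3,0),(20,0,1),(40,0,2),(80,0,3)]

-- [(0,0,0)] + rings + [pairwise sums of distinct rings]
def ringOptsB : List (Int × Int × Int) :=
  (0,0,0) :: (ringsB ++ (PySem.List.enumerate ringsB).flatMap (fun ir =>
    (PySem.List.slice ringsB (some (ir.1 + 1)) none).map (fun r2 =>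
      (ir.2.1 + r2.1, ir.2.2.1 + r2.2.1, ir.2.2.2 + r2.2.2))))

-- closed-form fight: player wins iff his kill-turn count is at most the boss's
def winsB (hp bdmg barm dmg arm : Int) : Bool :=
  let dp := max 1 (dmg - barm)
  let db := max 1 (bdmg - arm)
  decide (PySem.Int.floordiv (hp + dp - 1) dp ≤ PySem.Int.floordiv (100 + db - 1) db)

-- the cands list comprehension: costs of all winning loadouts
def candsB (hp bdmg barm : Int) : List Int :=
  swordsB.flatMap (fun s => armoursB.flatMap (fun a => ringOptsB.filterMap (fun r =>
    if winsB hp bdmg barm (s.2 + r.2.1) (a.2 + r.2.2) then some (s.1 + a.1 + r.1) else none)))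

def solve_alt (boss : List Int) : Int :=
  -- boss[0], boss[1], boss[2]; anything shorter is an IndexError in Python (outside Pre_solve)
  match boss with
  | hp :: rest =>
    match rest with
    | bdmg :: rest2 =>
      match rest2 with
      | barm :: _ =>
        match (candsB hp bdmg barm).min? with
        | some m => m
        | none => 0      -- the 'if cands else 0' branch; outside Pre_solve
      | [] => 0
    | [] => 0
  | [] => 0

-- ===== PRECONDITION & SPEC =====
-- Pre_solve = exactly where A terminates: boss has hp, damage and armour fields, positive hp,
-- and some loadout wins (otherwise A's 'while True' never returns; len(boss)<3 is an IndexError).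
def Pre_solve (boss : List Int) : Prop :=
  3 ≤ boss.length ∧ 0 < boss.getD 0 0 ∧
  ∃ s ∈ swordsB, ∃ a ∈ armoursB, ∃ r ∈ ringOptsB,
    winsB (boss.getD 0 0) (boss.getD 1 0) (boss.getD 2 0) (s.2 + r.2.1) (a.2 + r.2.2) = true
instance (boss : List Int) : Decidable (Pre_solve boss) := by unfold Pre_solve; infer_instance

def pvWitness_solve : List Int := [10, 5, 2]

def Spec_solve (boss : List Int) (out : Int) : Prop := out = solve_alt boss
instance (boss : List Int) (out : Int) : Decidable (Spec_solve boss out) := by unfold Spec_solve; infer_instance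

-- ===== CLAIM (what is proved, stated in full; the proofs are below) =====
def Claim_equal_solve : Prop := ∀ (boss : List Int), Dom_solve boss → Pre_solve boss → Spec_solve boss (solve boss)

-- ===== LEMMAS AND PROOFS =====
-- ceiling division by a positive divisor, as both ports compute it
def cdiv (x d : Int) : Int := PySem.Int.floordiv (x + d - 1) d

lemma one_le_cdiv {x d : Int} (hd : 1 ≤ d) (hx : 0 < x) : 1 ≤ cdiv x d := by
  unfold cdiv
  rw [PySem.Int.le_floordiv_iff_mul_le (by omega)]
  omega

lemma cdiv_le_one {x d : Int} (hd : 1 ≤ d) (hx : x ≤ d) : cdiv x d ≤ 1 := by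
  unfold cdiv
  have := PySem.Int.floordiv_lt_iff_lt_mul (a := x + d - 1) (b := d) (q := 2) (by omega)
  omega

lemma two_le_cdiv {x d : Int} (hd : 1 ≤ d) (hx : d < x) : 2 ≤ cdiv x d := by
  unfold cdiv
  rw [PySem.Int.le_floordiv_iff_mul_le (by omega)]
  omega

lemma cdiv_sub_self {x d : Int} (hd : 1 ≤ d) : cdiv (x - d) d = cdiv x d - 1 := by
  unfold cdiv
  have h := (PySem.Int.floordiv_eq_iff_of_pos (a := x + d - 1) (b := d)
    (q := PySem.Int.floordiv (x + d - 1) d) (by omega)).mp rfl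
  rw [PySem.Int.floordiv_eq_iff_of_pos (by omega)]
  constructor <;> nlinarith [h.1, h.2]

lemma fightAux_eq (pd pa bd ba : Int) : ∀ fuel : Nat, ∀ php bhp moves : Int,
    0 < php → 0 < bhp → moves % 2 = 0 → (php + bhp).toNat ≤ fuel →
    fightAux fuel php pd pa bhp bd ba moves =
      if cdiv bhp (max 1 (pd - ba)) ≤ cdiv php (max 1 (bd - pa)) then 1 else 0 := by
  intro fuel
  induction fuel using Nat.strong_induction_on with
  | _ fuel ih =>
    intro php bhp moves hp hb hm hfuel
    have hdp : 1 ≤ max 1 (pd - ba) := le_max_left _ _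
    have hdb : 1 ≤ max 1 (bd - pa) := le_max_left _ _
    obtain ⟨f, rfl⟩ : ∃ f, fuel = f + 2 := ⟨fuel - 2, by omega⟩
    rw [show f + 2 = (f + 1) + 1 from rfl]
    rw [fightAux, if_pos ⟨hp, hb⟩, if_pos hm, fightAux]
    have hm1 : ¬ (moves + 1) % 2 = 0 := by omega
    by_cases hbd : bhp - max 1 (pd - ba) > 0
    · rw [if_pos ⟨hp, hbd⟩, if_neg hm1]
      by_cases hpd : php - max 1 (bd - pa) > 0
      · rw [ih f (by omega) _ _ (moves + 1 + 1) hpd hbd (by omega) (by omega)]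
        rw [cdiv_sub_self hdp, cdiv_sub_self hdb]
        simp only [sub_le_sub_iff_right]
      · obtain ⟨f', rfl⟩ : ∃ f', f = f' + 1 := ⟨f - 1, by omega⟩
        rw [fightAux, if_neg (by omega)]
        have h2 : 2 ≤ cdiv bhp (max 1 (pd - ba)) := two_le_cdiv hdp (by omega)
        have h1 : cdiv php (max 1 (bd - pa)) ≤ 1 := cdiv_le_one hdb (by omega)
        rw [if_neg (by omega)]
        omega
    · rw [if_neg (by omega)]
      have h1 : cdiv bhp (max 1 (pd - ba)) ≤ 1 := cdiv_le_one hdp (by omega)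
      have h2 : 1 ≤ cdiv php (max 1 (bd - pa)) := one_le_cdiv hdb hp
      rw [if_pos (by omega)]
      omega

lemma fightA_wins (b0 b1 b2 : Int) (hb : 0 < b0) (pd pa : Int) :
    (fightA 100 pd pa b0 b1 b2 != 0) = winsB b0 b1 b2 pd pa := by
  unfold fightA
  rw [fightAux_eq pd pa b1 b2 ((100 + b0).toNat + 1) 100 b0 0 (by norm_num) hb (by norm_num)
    (Nat.le_succ _)]
  unfold winsB
  by_cases h : cdiv b0 (max 1 (pd - b2)) ≤ cdiv 100 (max 1 (b1 - pa))
  · rw [if_pos h]; simp only [cdiv] at h; rw [decide_eq_true h]; decide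
  · rw [if_neg h]; simp only [cdiv] at h; rw [decide_eq_false h]; decide

lemma breakAny_eq {α : Type} (c p : α → Bool) :
    ∀ xs : List α, List.Pairwise (fun x y => c x = true → c y = true) xs →
    breakAny c p xs = xs.any (fun x => !c x && p x) := by
  intro xs
  induction xs with
  | nil => intro _; rfl
  | cons x xs ih =>
    intro hxs
    rw [List.pairwise_cons] at hxs
    by_cases hc : c x = true
    · simp only [breakAny, List.any_cons, hc, Bool.not_true, Bool.false_and,
        Bool.false_or]
      exact (List.any_eq_false.mpr (fun y hy => by simp [hxs.1 y hy hc])).symm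
    · simp [breakAny, hc, ih hxs.2]

lemma mem_candsB (b0 b1 b2 : Int) (c : Int) : c ∈ candsB b0 b1 b2 ↔
    ∃ s ∈ swordsB, ∃ a ∈ armoursB, ∃ r ∈ ringOptsB,
      winsB b0 b1 b2 (s.2 + r.2.1) (a.2 + r.2.2) = true ∧ s.1 + a.1 + r.1 = c := by
  simp [candsB, List.mem_flatMap, List.mem_filterMap]

lemma tryGold_iff (b0 b1 b2 g : Int) (hb : 0 < b0) :
    tryGold b0 b1 b2 g = true ↔ ∃ c ∈ candsB b0 b1 b2, c ≤ g := by
  have hsw : List.Pairwise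
      (fun x y : Int × Int × Int => decide (x.1 > g) = true → decide (y.1 > g) = true) swordsA := by
    have h : List.Pairwise (fun x y : Int × Int × Int => x.1 ≤ y.1) swordsA := by decide
    exact h.imp (fun {x y} h hc => by simp_all; omega)
  have harm : ∀ sc : Int, List.Pairwise
      (fun x y : Int × Int × Int =>
        decide (sc + x.1 > g) = true → decide (sc + y.1 > g) = true) armoursA := by
    intro sc
    have h : List.Pairwise (fun x y : Int × Int × Int => x.1 ≤ y.1) armoursA := by decide
    exact h.imp (fun {x y} h hc => by simp_all; omega)
  have hinner : ∀ sc sd : Int,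
      breakAny (fun a => decide (sc + a.1 > g)) (tryArmour b0 b1 b2 g sc sd) armoursA
        = armoursA.any (fun a => !(decide (sc + a.1 > g)) && tryArmour b0 b1 b2 g sc sd a) :=
    fun sc sd => breakAny_eq _ _ _ (harm sc)
  have hmem := mem_candsB b0 b1 b2
  unfold tryGold
  rw [breakAny_eq _ _ _ hsw]
  simp only [hinner]
  unfold tryArmour
  simp only [fightA_wins b0 b1 b2 hb]
  simp only [List.any_eq_true, Bool.and_eq_true, Bool.or_eq_true, Bool.not_eq_true',
    decide_eq_false_iff_not, not_lt]
  constructor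
  · rintro ⟨s, hs, hsg, a, ha, hag, hwin⟩
    have t1 : ∀ s ∈ swordsA, (s.1, s.2.1) ∈ swordsB := by decide
    have t2 : ∀ a ∈ armoursA, (a.1, a.2.2) ∈ armoursB := by decide
    have t3 : ∀ r ∈ ringsA, r ∈ ringOptsB := by decide
    have t4 : ∀ p ∈ comb2 ringsA,
        (p.1.1 + p.2.1, p.1.2.1 + p.2.2.1, p.1.2.2 + p.2.2.2) ∈ ringOptsB := by decide
    rcases hwin with (hw | ⟨r, hr, hrg, hw⟩) | ⟨p, hp, hpg, hw⟩
    · exact ⟨s.1 + a.1 + 0, (hmem _).mpr ⟨(s.1, s.2.1), t1 s hs, (a.1, a.2.2), t2 a ha,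
        (0, 0, 0), by decide, by simpa using hw, rfl⟩, by omega⟩
    · exact ⟨s.1 + a.1 + r.1, (hmem _).mpr ⟨(s.1, s.2.1), t1 s hs, (a.1, a.2.2), t2 a ha,
        r, t3 r hr, hw, rfl⟩, hrg⟩
    · refine ⟨s.1 + a.1 + (p.1.1 + p.2.1), (hmem _).mpr ⟨(s.1, s.2.1), t1 s hs,
        (a.1, a.2.2), t2 a ha, _, t4 p hp, ?_, rfl⟩, by omega⟩
      simpa [add_assoc] using hw
  · rintro ⟨c, hc, hcg⟩
    obtain ⟨s', hs', a', ha', r, hr, hw, rfl⟩ := (hmem c).mp hc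
    have u1 : ∀ s' ∈ swordsB, ∃ s ∈ swordsA, s.1 = s'.1 ∧ s.2.1 = s'.2 := by decide
    have u2 : ∀ a' ∈ armoursB, ∃ a ∈ armoursA, a.1 = a'.1 ∧ a.2.2 = a'.2 := by decide
    have u3 : ∀ r ∈ ringOptsB, r = ((0:Int), (0:Int), (0:Int)) ∨ r ∈ ringsA ∨
        ∃ p ∈ comb2 ringsA, p.1.1 + p.2.1 = r.1 ∧ p.1.2.1 + p.2.2.1 = r.2.1 ∧
          p.1.2.2 + p.2.2.2 = r.2.2 := by decide
    have n2 : ∀ r ∈ ringOptsB, 0 ≤ r.1 := by decide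
    have n5 : ∀ a' ∈ armoursB, 0 ≤ a'.1 := by decide
    have hr0 := n2 r hr
    have ha0 := n5 a' ha'
    obtain ⟨s, hs, hs1, hs2⟩ := u1 s' hs'
    obtain ⟨a, ha, ha1, ha2⟩ := u2 a' ha'
    refine ⟨s, hs, by omega, a, ha, by omega, ?_⟩
    rcases u3 r hr with rfl | hrA | ⟨p, hp, e1, e2, e3⟩
    · left; left; rw [hs2, ha2]; simpa using hw
    · left; right
      exact ⟨r, hrA, by omega, by rw [hs2, ha2]; exact hw⟩
    · right
      refine ⟨p, hp, by omega, ?_⟩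
      rw [hs2, ha2, add_assoc, e2, add_assoc, e3]
      exact hw

lemma cands_bounds (b0 b1 b2 : Int) : ∀ c ∈ candsB b0 b1 b2, 8 ≤ c ∧ c ≤ 356 := by
  intro c hc
  obtain ⟨s, hs, a, ha, r, hr, _, rfl⟩ := (mem_candsB b0 b1 b2 c).mp hc
  have B1 : ∀ s ∈ swordsB, 8 ≤ s.1 ∧ s.1 ≤ 74 := by decide
  have B2 : ∀ a ∈ armoursB, 0 ≤ a.1 ∧ a.1 ≤ 102 := by decide
  have B3 : ∀ r ∈ ringOptsB, 0 ≤ r.1 ∧ r.1 ≤ 180 := by decide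
  have h1 := B1 s hs
  have h2 := B2 a ha
  have h3 := B3 r hr
  omega

lemma solveAux_eq (b0 b1 b2 m : Int) (hscan : ∀ g, tryGold b0 b1 b2 g = true ↔ m ≤ g) :
    ∀ fuel : Nat, ∀ g : Int, g ≤ m → m < g + (fuel : Int) → solveAux b0 b1 b2 fuel g = m := by
  intro fuel
  induction fuel with
  | zero => intro g h1 h2; exfalso; push_cast at h2; omega
  | succ f ih =>
    intro g h1 h2
    push_cast at h2
    by_cases hg : m ≤ g
    · have ht := (hscan g).mpr hg
      simp only [solveAux, if_pos ht]
      exact le_antisymm h1 hg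
    · have hfalse : ¬ tryGold b0 b1 b2 g = true := fun h => hg ((hscan g).mp h)
      simp only [solveAux, if_neg hfalse]
      exact ih (g + 1) (by omega) (by omega)

-- ===== VERDICT (by name: the statement is the Claim_ definition above) =====
theorem solve_spec : Claim_equal_solve := by
  unfold Claim_equal_solve
  intro boss _ hpre
  unfold Spec_solve
  obtain ⟨hlen, hpos, hwin⟩ := hpre
  rcases boss with _ | ⟨b0, boss⟩; · simp at hlen
  rcases boss with _ | ⟨b1, boss⟩; · simp at hlen
  rcases boss with _ | ⟨b2, rest⟩; · simp at hlen
  simp only [List.getD_cons_zero, List.getD_cons_succ] at hpos hwin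
  obtain ⟨s₀, hs₀, a₀, ha₀, r₀, hr₀, hw₀⟩ := hwin
  have hmem0 : s₀.1 + a₀.1 + r₀.1 ∈ candsB b0 b1 b2 :=
    (mem_candsB b0 b1 b2 _).mpr ⟨s₀, hs₀, a₀, ha₀, r₀, hr₀, hw₀, rfl⟩
  obtain ⟨m, hm⟩ : ∃ m, (candsB b0 b1 b2).min? = some m := by
    cases h : (candsB b0 b1 b2).min? with
    | none => rw [List.min?_eq_none_iff.mp h] at hmem0; simp at hmem0
    | some m => exact ⟨m, rfl⟩
  obtain ⟨hmmem, hle⟩ := List.min?_eq_some_iff.mp hm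
  have hscan : ∀ g : Int, tryGold b0 b1 b2 g = true ↔ m ≤ g := by
    intro g
    rw [tryGold_iff b0 b1 b2 g hpos]
    constructor
    · rintro ⟨c, hc, hcg⟩; exact le_trans (hle c hc) hcg
    · intro h; exact ⟨m, hmmem, h⟩
  have hb8 := cands_bounds b0 b1 b2 m hmmem
  show solveAux b0 b1 b2 400 8 = solve_alt (b0 :: b1 :: b2 :: rest)
  rw [solveAux_eq b0 b1 b2 m hscan 400 8 (by omega) (by push_cast; omega)]
  show m = (match (candsB b0 b1 b2).min? with | some m => m | none => 0)
  rw [hm]
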